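-- pv_equiv track=rewrite | github.com/bytebox-forge/voice-stack | tests/run_tests.py | _extract_count
-- ===== SOURCE A (Python) =====
-- def _extract_count(text: str, keyword: str) -> int:
--     """Extract count from pytest summary line"""
--     try:
--         parts = text.split()
--         for i, part in enumerate(parts):
--             if keyword in part and i > 0:
--                 return int(parts[i-1])
--     except (ValueError, IndexError):
--         pass
--     return 0
-- ===== SOURCE B (Python) =====
-- def _extract_count(text: str, keyword: str) -> int:
--     """Streaming character scan: walk the text once, carving out each
--     whitespace-delimited word in place; keep only the previous word in a
--     register, and on the first word containing the keyword that has a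
--     predecessor, convert that predecessor (0 if not an int)."""
--     i, n = 0, len(text)
--     prev = None
--     while i < n:
--         if text[i].isspace():
--             i += 1
--             continue
--         j = i
--         while j < n and not text[j].isspace():
--             j += 1
--         tok = text[i:j]
--         if prev is not None and keyword in tok:
--             try:
--                 return int(prev)
--             except ValueError:
--                 return 0
--         prev = tok
--         i = j
--     return 0
-- ===== Notes on version B (the rewrite author's own statement) =====
-- stated objective: alternative
-- what changed: Replaces split()-then-enumerate (materialize the whole token list, then an indexed scan with parts[i-1] lookups) by a single streaming character-level scan that carves each word out of the raw string in place and carries only the previous word in a register, never building a token list.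
import Mathlib
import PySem

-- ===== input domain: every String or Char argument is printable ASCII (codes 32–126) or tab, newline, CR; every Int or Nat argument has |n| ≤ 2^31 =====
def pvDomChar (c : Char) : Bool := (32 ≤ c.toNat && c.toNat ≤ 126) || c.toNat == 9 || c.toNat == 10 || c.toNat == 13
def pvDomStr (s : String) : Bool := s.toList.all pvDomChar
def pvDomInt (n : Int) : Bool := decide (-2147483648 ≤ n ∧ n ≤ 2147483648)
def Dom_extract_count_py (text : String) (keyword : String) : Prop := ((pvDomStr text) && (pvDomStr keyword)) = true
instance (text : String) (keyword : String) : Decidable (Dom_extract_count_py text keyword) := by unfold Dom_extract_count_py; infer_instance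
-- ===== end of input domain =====

-- B replaces split()+enumerate with a single streaming character-level scan carrying only the previous word; objective: alternative.


-- ===== PORT A =====
-- loop 'for i, part in enumerate(parts): if keyword in part and i > 0: return int(parts[i-1])';
-- int() ValueError (and the unreachable IndexError) is caught and the function returns 0
-- (ofStr? none → getD 0 is exact: the return after a failed int() is immediate)
def pvAGo (keyword : String) (parts : List String) : List (Int × String) → Int
  | [] => 0
  | (i, part) :: rest =>
    if PySem.Str.isIn keyword part && decide ((0:Int) < i) then
      ((PySem.List.pyGet? parts (i - 1)).bind PySem.Int.ofStr?).getD 0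
    else pvAGo keyword parts rest

def extract_count_py (text : String) (keyword : String) : Int :=
  let parts := PySem.Str.split₀ text
  pvAGo keyword parts (PySem.List.enumerate parts)

-- ===== PORT B =====
-- Source B's while loop over character positions, as structural recursion on the suffix of text's
-- characters: a space is skipped; at a non-space the inner 'while j < n' run is the word
-- tok = text[i:j] = takeWhile (not isspace), the loop resumes at i = j (dropWhile); 'prev' is
-- the Option register. int(prev) with ValueError → 0 is (ofChars? prev).getD 0 (return is immediate).
def pvBScan (kw : List Char) (prev : Option (List Char)) : List Char → Int
  | [] => 0
  | c :: cs =>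
    if PySem.Chars.isspace c then pvBScan kw prev cs
    else
      let tok := (c :: cs).takeWhile (fun d => !PySem.Chars.isspace d)
      let rest := (c :: cs).dropWhile (fun d => !PySem.Chars.isspace d)
      match prev with
      | some p =>
        if PySem.Chars.isIn kw tok then (PySem.Int.ofChars? p).getD 0
        else pvBScan kw (some tok) rest
      | none => pvBScan kw (some tok) rest
termination_by cs => cs.length
decreasing_by
  · simp
  · rename_i hc
    rw [List.dropWhile_cons_of_pos (by simp [hc])]
    exact Nat.lt_succ_of_le (List.length_dropWhile_le _ _)

def extract_count_py_alt (text : String) (keyword : String) : Int :=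
  pvBScan keyword.toList none text.toList

-- ===== PRECONDITION & SPEC =====
def Spec_extract_count_py (text : String) (keyword : String) (out : Int) : Prop := out = extract_count_py_alt text keyword
instance (text : String) (keyword : String) (out : Int) : Decidable (Spec_extract_count_py text keyword out) := by unfold Spec_extract_count_py; infer_instance

-- ===== CLAIM (what is proved, stated in full; the proofs are below) =====
def Claim_equal_extract_count_py : Prop := ∀ (text : String) (keyword : String), Dom_extract_count_py text keyword → Spec_extract_count_py text keyword (extract_count_py text keyword)

-- ===== LEMMAS AND PROOFS =====

-- the common token-level value both programs compute: int of the first token whose successor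
-- token contains kw (0 when int fails or there is no such pair)
def pvPairs (kw : List Char) (toks : List (List Char)) : Int :=
  match (toks.zip toks.tail).find? (fun pc => PySem.Chars.isIn kw pc.2) with
  | some (p, _) => (PySem.Int.ofChars? p).getD 0
  | none => 0


-- one-step unfoldings of split₀.go
theorem pvGo_nil (cur : List Char) (acc : List (List Char)) :
    PySem.Chars.split₀.go [] cur acc =
      if cur.isEmpty then acc.reverse else (cur.reverse :: acc).reverse := by
  by_cases h : cur.isEmpty <;> simp [PySem.Chars.split₀.go, h]

theorem pvGo_space {c : Char} (rest cur : List Char) (acc : List (List Char))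
    (hc : PySem.Chars.isspace c = true) :
    PySem.Chars.split₀.go (c :: rest) cur acc =
      if cur.isEmpty then PySem.Chars.split₀.go rest [] acc
      else PySem.Chars.split₀.go rest [] (cur.reverse :: acc) := by
  by_cases h : cur.isEmpty <;> simp [PySem.Chars.split₀.go, hc, h]

theorem pvGo_word {c : Char} (rest cur : List Char) (acc : List (List Char))
    (hc : PySem.Chars.isspace c = false) :
    PySem.Chars.split₀.go (c :: rest) cur acc = PySem.Chars.split₀.go rest (c :: cur) acc := by
  simp [PySem.Chars.split₀.go, hc]

theorem pvGo_acc (s : List Char) : ∀ (cur : List Char) (acc : List (List Char)),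
    PySem.Chars.split₀.go s cur acc = acc.reverse ++ PySem.Chars.split₀.go s cur [] := by
  induction s with
  | nil =>
    intro cur acc
    by_cases h : cur.isEmpty <;> simp [pvGo_nil, h]
  | cons c rest ih =>
    intro cur acc
    by_cases hc : PySem.Chars.isspace c
    · rw [pvGo_space rest cur acc hc, pvGo_space rest cur [] hc]
      by_cases h : cur.isEmpty
      · simp only [h, if_true]; exact ih [] acc
      · simp only [h, if_false, Bool.false_eq_true]
        rw [ih [] (cur.reverse :: acc), ih [] [cur.reverse]]
        simp
    · simp only [Bool.not_eq_true] at hc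
      rw [pvGo_word rest cur acc hc, pvGo_word rest cur [] hc]
      exact ih (c :: cur) acc

theorem pvGo_run (s : List Char) : ∀ (cur : List Char) (acc : List (List Char)),
    PySem.Chars.split₀.go s cur acc =
      PySem.Chars.split₀.go (s.dropWhile (fun d => !PySem.Chars.isspace d))
        ((s.takeWhile (fun d => !PySem.Chars.isspace d)).reverse ++ cur) acc := by
  induction s with
  | nil => intro cur acc; simp
  | cons c rest ih =>
    intro cur acc
    by_cases hc : PySem.Chars.isspace c
    · rw [List.dropWhile_cons_of_neg (by simp [hc]), List.takeWhile_cons_of_neg (by simp [hc])]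
      simp
    · simp only [Bool.not_eq_true] at hc
      rw [List.dropWhile_cons_of_pos (by simp [hc]), List.takeWhile_cons_of_pos (by simp [hc])]
      rw [pvGo_word rest cur acc hc, ih (c :: cur) acc]
      simp

theorem pvSplit_space {c : Char} (cs : List Char) (hc : PySem.Chars.isspace c = true) :
    PySem.Chars.split₀ (c :: cs) = PySem.Chars.split₀ cs := by
  show PySem.Chars.split₀.go (c :: cs) [] [] = PySem.Chars.split₀.go cs [] []
  rw [pvGo_space cs [] [] hc]; rfl

theorem pvSplit_word {c : Char} (cs : List Char) (hc : PySem.Chars.isspace c = false) :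
    PySem.Chars.split₀ (c :: cs) =
      ((c :: cs).takeWhile (fun d => !PySem.Chars.isspace d)) ::
        PySem.Chars.split₀ ((c :: cs).dropWhile (fun d => !PySem.Chars.isspace d)) := by
  rw [List.dropWhile_cons_of_pos (by simp [hc]), List.takeWhile_cons_of_pos (by simp [hc])]
  show PySem.Chars.split₀.go (c :: cs) [] [] = _
  rw [pvGo_word cs [] [] hc, pvGo_run cs [c] []]
  cases hd : cs.dropWhile (fun d => !PySem.Chars.isspace d) with
  | nil =>
    rw [pvGo_nil, if_neg (by simp)]
    show _ = _ :: PySem.Chars.split₀.go [] [] []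
    rw [pvGo_nil]
    simp
  | cons c' r =>
    have hc' : PySem.Chars.isspace c' = true := by
      have := List.head?_dropWhile_not (fun d => !PySem.Chars.isspace d) cs
      rw [hd] at this
      simpa using this
    rw [pvGo_space r _ [] hc', if_neg (by simp), pvGo_acc]
    show _ = _ :: PySem.Chars.split₀.go (c' :: r) [] []
    rw [pvGo_space r [] [] hc']
    simp

def pvConsP (prev : Option (List Char)) (t : List (List Char)) : List (List Char) :=
  match prev with
  | none => t
  | some p => p :: t

theorem pvPairs_cons2 (kw p tok : List Char) (T : List (List Char)) :
    pvPairs kw (p :: tok :: T) =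
      if PySem.Chars.isIn kw tok then (PySem.Int.ofChars? p).getD 0 else pvPairs kw (tok :: T) := by
  by_cases h : PySem.Chars.isIn kw tok = true
  · rw [if_pos h]
    unfold pvPairs
    rw [List.tail_cons, List.zip_cons_cons, List.find?_cons_of_pos (by simpa using h)]
  · rw [if_neg h]
    unfold pvPairs
    rw [List.tail_cons, List.zip_cons_cons, List.find?_cons_of_neg (by simpa using h), List.tail_cons]

theorem pvSplit_nil : PySem.Chars.split₀ ([] : List Char) = [] := by
  show PySem.Chars.split₀.go [] [] [] = []
  rw [pvGo_nil]; simp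

theorem pvBScan_eq (kw : List Char) : ∀ (prev : Option (List Char)) (cs : List Char),
    pvBScan kw prev cs = pvPairs kw (pvConsP prev (PySem.Chars.split₀ cs)) := by
  intro prev cs
  induction prev, cs using pvBScan.induct kw with
  | case1 prev =>
    cases prev <;> simp [pvBScan, pvConsP, pvPairs, pvSplit_nil]
  | case2 prev c cs hc ih =>
    rw [show pvBScan kw prev (c :: cs) = pvBScan kw prev cs by rw [pvBScan]; simp [hc]]
    rw [pvSplit_space cs hc]
    exact ih
  | case3 c cs hc tok p hin =>
    simp only [Bool.not_eq_true] at hc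
    have hin' : PySem.Chars.isIn kw ((c :: cs).takeWhile (fun d => !PySem.Chars.isspace d)) = true := hin
    rw [show pvBScan kw (some p) (c :: cs) = (PySem.Int.ofChars? p).getD 0 by
      rw [pvBScan]; simp only [hc, Bool.false_eq_true, if_false, hin', if_true]]
    rw [pvSplit_word cs hc, pvConsP, pvPairs_cons2, if_pos hin']
  | case4 c cs hc tok rest p hin ih =>
    simp only [Bool.not_eq_true] at hc
    have hin' : ¬ PySem.Chars.isIn kw ((c :: cs).takeWhile (fun d => !PySem.Chars.isspace d)) = true := hin
    rw [show pvBScan kw (some p) (c :: cs) =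
          pvBScan kw (some ((c :: cs).takeWhile (fun d => !PySem.Chars.isspace d)))
            ((c :: cs).dropWhile (fun d => !PySem.Chars.isspace d)) by
      rw [pvBScan]
      simp only [hc, Bool.false_eq_true, if_false, ite_eq_right_iff]
      intro hx; exact absurd hx hin']
    rw [pvSplit_word cs hc, pvConsP, pvPairs_cons2, if_neg hin']
    exact ih
  | case5 c cs hc tok rest ih =>
    simp only [Bool.not_eq_true] at hc
    rw [show pvBScan kw none (c :: cs) =
          pvBScan kw (some ((c :: cs).takeWhile (fun d => !PySem.Chars.isspace d)))
            ((c :: cs).dropWhile (fun d => !PySem.Chars.isspace d)) by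
      rw [pvBScan]; simp only [hc, Bool.false_eq_true, if_false]]
    rw [pvSplit_word cs hc]
    exact ih

-- A's indexed loop computes the same token-level value, at the String level
def pvPairsStr (kw : String) (toks : List String) : Int :=
  match (toks.zip toks.tail).find? (fun pc => PySem.Str.isIn kw pc.2) with
  | some (p, _) => (PySem.Int.ofStr? p).getD 0
  | none => 0

theorem pvAGo_enum_eq (keyword : String) (parts : List String) :
    ∀ (l : List String) (n : ℕ) (prev : String),
      parts.drop n = prev :: l →
      pvAGo keyword parts (PySem.List.enumerate l ((n : Int) + 1)) = pvPairsStr keyword (prev :: l) := by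
  intro l
  induction l with
  | nil => intro n prev h; simp [PySem.List.enumerate_nil, pvAGo, pvPairsStr]
  | cons c l' ih =>
    intro n prev h
    rw [PySem.List.enumerate_cons]
    show pvAGo keyword parts (((n : Int) + 1, c) :: PySem.List.enumerate l' ((n : Int) + 1 + 1)) = _
    rw [pvAGo]
    have hn : parts[n]? = some prev := by
      have := congrArg List.head? h
      simpa [List.head?_drop] using this
    have hz : pvPairsStr keyword (prev :: c :: l') =
        (if PySem.Str.isIn keyword c then (PySem.Int.ofStr? prev).getD 0
         else pvPairsStr keyword (c :: l')) := by
      by_cases hk : PySem.Str.isIn keyword c = true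
      · rw [if_pos hk]
        unfold pvPairsStr
        rw [List.tail_cons, List.zip_cons_cons, List.find?_cons_of_pos (by simpa using hk)]
      · rw [if_neg hk]
        unfold pvPairsStr
        rw [List.tail_cons, List.zip_cons_cons, List.find?_cons_of_neg (by simpa using hk), List.tail_cons]
    rw [hz]
    by_cases hk : PySem.Str.isIn keyword c = true
    · have hget : PySem.List.pyGet? parts ((n : Int) + 1 - 1) = some prev := by
        have he : ((n : Int) + 1 - 1) = (n : Int) := by ring
        rw [he, PySem.List.pyGet?_natCast, hn]
      rw [if_pos (by rw [hk]; simp only [Bool.true_and, decide_eq_true_eq]; omega), if_pos hk, hget]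
      rfl
    · have hdrop : parts.drop (n + 1) = c :: l' := by
        have h1 : (parts.drop n).tail = c :: l' := by rw [h]; rfl
        rwa [List.tail_drop] at h1
      rw [if_neg (by intro hc; rw [Bool.and_eq_true] at hc; exact hk hc.1), if_neg hk]
      have hcast : ((n : Int) + 1 + 1) = (((n + 1 : ℕ) : Int) + 1) := by push_cast; ring
      rw [hcast, ih (n + 1) c hdrop]

theorem pvA_pairs (text keyword : String) :
    extract_count_py text keyword = pvPairsStr keyword (PySem.Str.split₀ text) := by
  unfold extract_count_py
  cases hp : PySem.Str.split₀ text with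
  | nil => simp [PySem.List.enumerate_nil, pvAGo, pvPairsStr]
  | cons p0 tl =>
    show pvAGo keyword (p0 :: tl) (PySem.List.enumerate (p0 :: tl) 0) = _
    rw [PySem.List.enumerate_cons, pvAGo]
    rw [if_neg (by simp)]
    have := pvAGo_enum_eq keyword (p0 :: tl) tl 0 p0 (by simp)
    simpa using this

-- the String-level and Char-level token values coincide
theorem pvPairsStr_map (kw : String) (L : List (List Char)) :
    pvPairsStr kw (L.map String.ofList) = pvPairs kw.toList L := by
  unfold pvPairsStr pvPairs
  rw [← List.map_tail, List.zip_map, List.find?_map]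
  have hp : ((fun pc => PySem.Str.isIn kw pc.2) ∘ Prod.map String.ofList String.ofList) =
      (fun pc => PySem.Chars.isIn kw.toList pc.2) := by
    funext pc
    simp [PySem.Str.isIn, String.toList_ofList]
  rw [hp]
  cases h : (L.zip L.tail).find? (fun pc => PySem.Chars.isIn kw.toList pc.2) with
  | none => rfl
  | some pr =>
    cases pr with
    | mk p t => simp [PySem.Int.ofStr?, String.toList_ofList]

-- ===== VERDICT (by name: the statement is the Claim_ definition above) =====
theorem extract_count_py_spec : Claim_equal_extract_count_py := by
  intro text keyword _
  unfold Spec_extract_count_py extract_count_py_alt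
  rw [pvA_pairs, pvBScan_eq]
  show pvPairsStr keyword (PySem.Str.split₀ text) = pvPairs keyword.toList (PySem.Chars.split₀ text.toList)
  rw [show PySem.Str.split₀ text = (PySem.Chars.split₀ text.toList).map String.ofList from rfl]
  exact pvPairsStr_map keyword (PySem.Chars.split₀ text.toList)
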